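-- pv_equiv track=rewrite | github.com/mainnet-pat/Electron-Cash | electroncash_gui/qt/dice_dialog.py | is_correct_dice_input
-- ===== SOURCE A (Python) =====
-- def is_correct_dice_input(data):
--     # Initialize to True.  Set False if not all digits or if not enough digits.
--     retval = True
--     if len(data) < 100:
--         retval = False
--         return retval
--     for ch in data:
--         if not ch in "123456":
--             retval = False
--     return retval
-- ===== SOURCE B (Python) =====
-- def is_correct_dice_input(data):
--     # Counting formulation: the input is valid iff it is long enough and the
--     # occurrences of the six allowed digits account for every character.
--     if len(data) < 100:
--         return False
--     return sum(data.count(d) for d in "123456") == len(data)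
-- ===== Notes on version B (the rewrite author's own statement) =====
-- stated objective: alternative
-- what changed: Replaces A's flag-carrying per-character membership loop by an arithmetic formulation: count the occurrences of each of the six allowed digits and accept iff those counts sum to the full string length.
import Mathlib
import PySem

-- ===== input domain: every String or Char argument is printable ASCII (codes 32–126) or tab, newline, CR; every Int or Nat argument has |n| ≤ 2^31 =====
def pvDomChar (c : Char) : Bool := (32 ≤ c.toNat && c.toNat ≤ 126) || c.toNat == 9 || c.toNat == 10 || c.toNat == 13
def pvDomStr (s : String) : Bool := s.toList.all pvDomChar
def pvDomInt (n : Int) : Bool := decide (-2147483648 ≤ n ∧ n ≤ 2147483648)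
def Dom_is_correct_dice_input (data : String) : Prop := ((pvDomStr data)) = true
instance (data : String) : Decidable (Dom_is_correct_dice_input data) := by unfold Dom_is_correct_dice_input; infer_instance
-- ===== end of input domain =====

-- B replaces A's flag-carrying membership loop by an arithmetic formulation: the six digit counts must sum to the string length (alternative, same cost).

-- ===== PORT A =====
def is_correct_dice_input (data : String) : Bool :=
  let retval := true
  if data.toList.length < 100 then
    false
  else
    data.toList.foldl (fun retval ch =>
      if !(("123456".toList).contains ch) then false else retval) retval

-- ===== PORT B =====
def is_correct_dice_input_alt (data : String) : Bool :=
  if data.toList.length < 100 then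
    false
  else
    decide ((("123456".toList).foldl (fun acc d => acc + data.toList.count d) 0) = data.toList.length)

-- ===== PRECONDITION & SPEC =====
def Spec_is_correct_dice_input (data : String) (out : Bool) : Prop := out = is_correct_dice_input_alt data
instance (data : String) (out : Bool) : Decidable (Spec_is_correct_dice_input data out) := by unfold Spec_is_correct_dice_input; infer_instance

-- ===== CLAIM (what is proved, stated in full; the proofs are below) =====
def Claim_equal_is_correct_dice_input : Prop := ∀ (data : String), Dom_is_correct_dice_input data → Spec_is_correct_dice_input data (is_correct_dice_input data)

-- ===== LEMMAS AND PROOFS =====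

-- A's loop with a sticky false flag computes 'b && all chars allowed'.
theorem dice_foldl_all (L l : List Char) (b : Bool) :
    l.foldl (fun r ch => if !(L.contains ch) then false else r) b
      = (b && l.all L.contains) := by
  induction l generalizing b with
  | nil => simp
  | cons c l ih =>
    simp only [List.foldl_cons, List.all_cons, ih]
    cases hc : L.contains c <;> simp

-- summing counts over a duplicate-free digit list counts the allowed characters.
theorem dice_sum_counts (l : List Char) (ds : List Char) (hds : ds.Nodup) (n : Nat) :
    ds.foldl (fun acc d => acc + l.count d) n
      = n + l.countP (fun c => ds.contains c) := by
  induction ds generalizing n with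
  | nil => simp
  | cons d ds ih =>
    have hnd : d ∉ ds := (List.nodup_cons.mp hds).1
    have key : ∀ m : List Char, m.countP (fun c => (d :: ds).contains c)
        = m.count d + m.countP (fun c => ds.contains c) := by
      intro m
      induction m with
      | nil => simp
      | cons c m ihm =>
        rw [List.countP_cons, List.countP_cons, List.count_cons, ihm]
        by_cases hc : c = d
        · subst hc
          simp [hnd]
          omega
        · simp [hc]
          omega
    rw [List.foldl_cons, ih (List.nodup_cons.mp hds).2, key]
    omega

-- the allowed digits account for the whole string iff every character is allowed.
theorem dice_countP_len (l ds : List Char) :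
    (l.countP (fun c => ds.contains c) = l.length) ↔ (l.all ds.contains = true) := by
  rw [List.countP_eq_length]
  simp [List.all_eq_true]

-- ===== VERDICT (by name: the statement is the Claim_ definition above) =====
theorem is_correct_dice_input_spec : Claim_equal_is_correct_dice_input := by
  intro data _
  unfold Spec_is_correct_dice_input is_correct_dice_input is_correct_dice_input_alt
  dsimp only
  by_cases h : data.toList.length < 100
  · rw [if_pos h, if_pos h]
  · have hnd : ("123456".toList).Nodup := by decide
    rw [if_neg h, if_neg h, dice_foldl_all, Bool.true_and,
      dice_sum_counts data.toList _ hnd 0, Nat.zero_add,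
      Bool.eq_iff_iff, decide_eq_true_iff, dice_countP_len]
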